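-- pv_equiv track=rewrite | github.com/JonasTriki/masters-thesis-ml | code/word_embeddings/utils.py | calc_skipgram_pairs_number
-- ===== SOURCE A (Python) =====
-- def calc_skipgram_pairs_number(
--     sequence: list, window_size: int, negative_samples: int,
-- ) -> int:
--     """
--     Calculates the number of possible generated
--     skipgram pairs in a sequence of word integers.
--
--     Uses the general formula:
--         window_size * 2 * negative_samples * len(sequence)
--
--     With the exception of corner-cases such as the
--     start or the end of a sequence
--     """
--     num_positive_samples = 0
--     for i, wi in enumerate(sequence):
--
--         # Count positive samples
--         window_start = max(0, i - window_size)
--         window_end = min(len(sequence), i + window_size + 1)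
--         for j in range(window_start, window_end):
--             if j != i:
--                 num_positive_samples += 1
--
--     # For each positive sample, we generate 1 positive
--     # sample plus `negative_samples`
--     return (negative_samples + 1) * num_positive_samples
-- ===== SOURCE B (Python) =====
-- def calc_skipgram_pairs_number(
--     sequence: list, window_size: int, negative_samples: int,
-- ) -> int:
--     # Closed form: ordered pairs (i, j), i != j, |i - j| <= window_size.
--     # For each distance d in 1..m (m = min(window_size, n-1)) there are 2*(n-d) pairs.
--     n = len(sequence)
--     m = max(0, min(window_size, n - 1))
--     num_positive_samples = 2 * (m * n - m * (m + 1) // 2)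
--     return (negative_samples + 1) * num_positive_samples
-- ===== Notes on version B (the rewrite author's own statement) =====
-- stated objective: faster
-- what changed: Replaces the O(n*window_size) double loop over positions and windows by an O(1) closed-form count 2*(m*n - m*(m+1)/2) with m = min(window_size, n-1) clamped at 0, counting ordered in-window pairs by distance.
import Mathlib
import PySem

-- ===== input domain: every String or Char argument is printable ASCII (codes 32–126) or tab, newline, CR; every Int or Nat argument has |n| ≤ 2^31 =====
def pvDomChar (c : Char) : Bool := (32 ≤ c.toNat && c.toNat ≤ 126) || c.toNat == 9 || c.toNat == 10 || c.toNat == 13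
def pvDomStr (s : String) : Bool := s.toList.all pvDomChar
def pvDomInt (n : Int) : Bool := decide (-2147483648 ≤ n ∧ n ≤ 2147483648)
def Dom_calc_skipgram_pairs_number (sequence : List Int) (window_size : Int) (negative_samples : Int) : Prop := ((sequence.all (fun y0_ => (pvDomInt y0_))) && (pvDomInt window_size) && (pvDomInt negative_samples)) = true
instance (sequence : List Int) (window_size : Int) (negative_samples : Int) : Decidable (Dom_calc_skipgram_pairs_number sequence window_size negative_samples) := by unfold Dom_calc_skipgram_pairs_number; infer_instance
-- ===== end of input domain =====

-- B replaces A's O(n·w) double loop by an O(1) closed-form pair count; equivalence proved below.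


-- ===== PORT A =====
def calc_skipgram_pairs_number (sequence : List Int) (window_size : Int) (negative_samples : Int) : Int :=
  let num_positive_samples :=
    (PySem.List.enumerate sequence).foldl (fun num p =>
      let window_start := max 0 (p.1 - window_size)
      let window_end := min (sequence.length : Int) (p.1 + window_size + 1)
      (PySem.List.pyRange window_start window_end).foldl
        (fun a j => if j ≠ p.1 then a + 1 else a) num) 0
  (negative_samples + 1) * num_positive_samples

-- ===== PORT B =====
def calc_skipgram_pairs_number_alt (sequence : List Int) (window_size : Int) (negative_samples : Int) : Int :=
  let n : Int := sequence.length
  let m := max 0 (min window_size (n - 1))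
  let num_positive_samples := 2 * (m * n - PySem.Int.floordiv (m * (m + 1)) 2)
  (negative_samples + 1) * num_positive_samples

-- ===== PRECONDITION & SPEC =====
def Spec_calc_skipgram_pairs_number (sequence : List Int) (window_size : Int) (negative_samples : Int) (out : Int) : Prop := out = calc_skipgram_pairs_number_alt sequence window_size negative_samples
instance (sequence : List Int) (window_size : Int) (negative_samples : Int) (out : Int) : Decidable (Spec_calc_skipgram_pairs_number sequence window_size negative_samples out) := by unfold Spec_calc_skipgram_pairs_number; infer_instance

-- ===== CLAIM (what is proved, stated in full; the proofs are below) =====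
def Claim_equal_calc_skipgram_pairs_number : Prop := ∀ (sequence : List Int) (window_size : Int) (negative_samples : Int), Dom_calc_skipgram_pairs_number sequence window_size negative_samples → Spec_calc_skipgram_pairs_number sequence window_size negative_samples (calc_skipgram_pairs_number sequence window_size negative_samples)

-- ===== LEMMAS AND PROOFS =====

-- the number of positive samples A's inner loop contributes at position i (0 ≤ i < n)
def cterm (n w i : Int) : Int := if 1 ≤ w then min n (i + w + 1) - max 0 (i - w) - 1 else 0

-- sum of cterm over positions s, s+1, …, s+k-1
def csum (n w s : Int) : Nat → Int
  | 0 => 0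
  | k + 1 => csum n w s k + cterm n w (s + k)

-- A's inner loop counts (window length − 1) when w ≥ 1, and 0 otherwise
lemma inner_count (n w i : Int) (acc : Int) (h0 : 0 ≤ i) (h1 : i < n) :
    (PySem.List.pyRange (max 0 (i - w)) (min n (i + w + 1))).foldl
      (fun a j => if j ≠ i then a + 1 else a) acc = acc + cterm n w i := by
  rw [PySem.List.foldl_ite_add_one (fun j => j ≠ i)]
  congr 1
  by_cases hw : 1 ≤ w
  · have hws : max 0 (i - w) ≤ i := by omega
    have hwe : i + 1 ≤ min n (i + w + 1) := by omega
    rw [PySem.List.pyRange_one_append (max 0 (i - w)) i (min n (i + w + 1)) hws (by omega),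
        PySem.List.pyRange_one_append i (i + 1) (min n (i + w + 1)) (by omega) hwe]
    rw [List.countP_append, List.countP_append]
    have c1 : List.countP (fun x => decide (x ≠ i)) (PySem.List.pyRange (max 0 (i - w)) i)
        = (PySem.List.pyRange (max 0 (i - w)) i).length := by
      apply List.countP_eq_length.mpr
      intro x hx
      have := PySem.List.mem_pyRange_one.mp hx
      simp; omega
    have c2 : List.countP (fun x => decide (x ≠ i)) (PySem.List.pyRange (i + 1) (min n (i + w + 1)))
        = (PySem.List.pyRange (i + 1) (min n (i + w + 1))).length := by
      apply List.countP_eq_length.mpr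
      intro x hx
      have := PySem.List.mem_pyRange_one.mp hx
      simp; omega
    have c3 : List.countP (fun x => decide (x ≠ i)) (PySem.List.pyRange i (i + 1)) = 0 := by
      rw [PySem.List.pyRange_one_singleton]
      simp
    rw [c1, c2, c3, PySem.List.length_pyRange_one, PySem.List.length_pyRange_one]
    simp only [cterm, if_pos hw]
    omega
  · simp only [cterm, if_neg hw]
    by_cases hw0 : w = 0
    · subst hw0
      have : max 0 (i - 0) = i := by omega
      rw [this]
      have : min n (i + 0 + 1) = i + 1 := by omega
      rw [this, PySem.List.pyRange_one_singleton]
      simp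
    · rw [PySem.List.pyRange_one_eq_nil (by omega)]
      simp

lemma csum_shift (n w s : Int) (k : Nat) :
    csum n w s (k + 1) = cterm n w s + csum n w (s + 1) k := by
  induction k with
  | zero => simp [csum]
  | succ k ih =>
    show csum n w s (k + 1) + cterm n w (s + (k + 1)) = _
    rw [ih]
    have : s + (↑k + 1) = (s + 1) + ↑k := by ring
    rw [this]
    show _ = cterm n w s + (csum n w (s + 1) k + cterm n w ((s + 1) + ↑k))
    ring

-- the outer fold over enumerate sums cterm over the index range
lemma outer_fold (n w : Int) (xs : List Int) : ∀ (s acc : Int), 0 ≤ s → s + xs.length ≤ n →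
    (PySem.List.enumerate xs s).foldl (fun num p =>
      (PySem.List.pyRange (max 0 (p.1 - w)) (min n (p.1 + w + 1))).foldl
        (fun a j => if j ≠ p.1 then a + 1 else a) num) acc
    = acc + csum n w s xs.length := by
  induction xs with
  | nil => intro s acc _ _; simp [PySem.List.enumerate, csum]
  | cons x xs ih =>
    intro s acc hs hn
    rw [PySem.List.enumerate_cons, List.foldl_cons]
    rw [inner_count n w s acc hs (by simp at hn; omega)]
    rw [ih (s + 1) _ (by omega) (by simp at hn ⊢; omega)]
    simp only [List.length_cons]
    rw [csum_shift]
    ring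

-- closed form for 2 · csum when w ≥ 1
lemma csum_closed (n w : Int) (hw : 1 ≤ w) : ∀ (k : Nat), (k : Int) ≤ n →
    2 * csum n w 0 k =
      2 * (min (k : Int) (max 0 (n - w))) * w + 2 * (min (k : Int) (max 0 (n - w)))
      + (min (k : Int) (max 0 (n - w))) * ((min (k : Int) (max 0 (n - w))) - 1)
      + 2 * ((k : Int) - min (k : Int) (max 0 (n - w))) * n
      - (max 0 ((k : Int) - w - 1)) * ((max 0 ((k : Int) - w - 1)) + 1)
      - 2 * (k : Int) := by
  intro k
  induction k with
  | zero =>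
    intro _
    have h1 : min (0 : Int) (max 0 (n - w)) = 0 := by omega
    have h2 : max (0 : Int) (0 - w - 1) = 0 := by omega
    simp only [Nat.cast_zero, h1, h2, csum]
    ring
  | succ k ih =>
    intro hk
    push_cast at hk ⊢
    have hk' : (k : Int) ≤ n := by omega
    have hk0 : (0 : Int) ≤ (k : Int) := by positivity
    show 2 * (csum n w 0 k + cterm n w (0 + k)) = _
    rw [mul_add, ih hk']
    simp only [cterm, if_pos hw, zero_add]
    -- resolve all min/max by cases, then pure algebra
    by_cases h1 : (k : Int) + 1 ≤ n - w
    · have ht : min (k : Int) (max 0 (n - w)) = (k : Int) := by omega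
      have ht' : min ((k : Int) + 1) (max 0 (n - w)) = (k : Int) + 1 := by omega
      have hm : min n ((k : Int) + w + 1) = (k : Int) + w + 1 := by omega
      by_cases h2 : (k : Int) ≤ w
      · have hs : max 0 ((k : Int) - w - 1) = 0 := by omega
        have hs' : max 0 ((k : Int) + 1 - w - 1) = 0 := by omega
        have hx : max 0 ((k : Int) - w) = 0 := by omega
        rw [ht, ht', hm, hs, hs', hx]; ring
      · have hs : max 0 ((k : Int) - w - 1) = (k : Int) - w - 1 := by omega
        have hs' : max 0 ((k : Int) + 1 - w - 1) = (k : Int) - w := by omega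
        have hx : max 0 ((k : Int) - w) = (k : Int) - w := by omega
        rw [ht, ht', hm, hs, hs', hx]; ring
    · have hb : max 0 (n - w) = min ((k : Int) + 1) (max 0 (n - w)) := by omega
      have ht' : min ((k : Int) + 1) (max 0 (n - w)) = max 0 (n - w) := by omega
      have ht : min (k : Int) (max 0 (n - w)) = max 0 (n - w) := by omega
      have hm : min n ((k : Int) + w + 1) = n := by omega
      by_cases h2 : (k : Int) ≤ w
      · have hs : max 0 ((k : Int) - w - 1) = 0 := by omega
        have hs' : max 0 ((k : Int) + 1 - w - 1) = 0 := by omega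
        have hx : max 0 ((k : Int) - w) = 0 := by omega
        rw [ht, ht', hm, hs, hs', hx]; ring
      · have hs : max 0 ((k : Int) - w - 1) = (k : Int) - w - 1 := by omega
        have hs' : max 0 ((k : Int) + 1 - w - 1) = (k : Int) - w := by omega
        have hx : max 0 ((k : Int) - w) = (k : Int) - w := by omega
        rw [ht, ht', hm, hs, hs', hx]; ring

lemma csum_zero_of_w_le_zero (n w s : Int) (hw : ¬ 1 ≤ w) : ∀ (k : Nat), csum n w s k = 0 := by
  intro k
  induction k with
  | zero => rfl
  | succ k ih => show csum n w s k + cterm n w (s + k) = 0; rw [ih]; simp [cterm, hw]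

lemma two_floordiv_consec (m : Int) : 2 * PySem.Int.floordiv (m * (m + 1)) 2 = m * (m + 1) := by
  rw [PySem.Int.floordiv_eq_ediv_of_pos (by norm_num)]
  rw [Int.mul_ediv_cancel']
  exact (Int.even_mul_succ_self m).two_dvd

-- the key equality: A's counted sum equals B's closed form
lemma csum_eq_closed_form (n w : Int) (hn : 0 ≤ n) :
    csum n w 0 n.toNat =
      2 * (max 0 (min w (n - 1)) * n - PySem.Int.floordiv (max 0 (min w (n - 1)) * (max 0 (min w (n - 1)) + 1)) 2) := by
  set m := max 0 (min w (n - 1)) with hm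
  have key : 2 * csum n w 0 n.toNat = 2 * (2 * (m * n - PySem.Int.floordiv (m * (m + 1)) 2)) := by
    have h2 : 2 * (2 * (m * n - PySem.Int.floordiv (m * (m + 1)) 2)) = 4 * m * n - 2 * (m * (m + 1)) := by
      have := two_floordiv_consec m
      ring_nf
      ring_nf at this
      omega
    rw [h2]
    by_cases hw : 1 ≤ w
    · rw [csum_closed n w hw n.toNat (by omega)]
      have hcast : ((n.toNat : Int)) = n := by omega
      rw [hcast]
      by_cases hnw : n ≤ w
      · have ht : min n (max 0 (n - w)) = 0 := by omega
        have hs : max 0 (n - w - 1) = 0 := by omega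
        have hmv : m = n - 1 ∨ (n = 0 ∧ m = 0) := by omega
        rcases hmv with h | ⟨h0, h⟩ <;> rw [ht, hs, h] <;> [ring; (rw [h0]; ring)]
      · have ht : min n (max 0 (n - w)) = n - w := by omega
        have hs : max 0 (n - w - 1) = n - w - 1 := by omega
        have hmv : m = w := by omega
        rw [ht, hs, hmv]; ring
    · rw [csum_zero_of_w_le_zero n w 0 hw n.toNat]
      have hmv : m = 0 := by omega
      rw [hmv]; ring
  omega

-- ===== VERDICT (by name: the statement is the Claim_ definition above) =====
theorem calc_skipgram_pairs_number_spec : Claim_equal_calc_skipgram_pairs_number := by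
  intro sequence window_size negative_samples _
  show _ = _
  unfold calc_skipgram_pairs_number calc_skipgram_pairs_number_alt
  simp only []
  rw [outer_fold (sequence.length : Int) window_size sequence 0 0 le_rfl (by simp)]
  rw [zero_add]
  congr 1
  have := csum_eq_closed_form (sequence.length : Int) window_size (by positivity)
  simpa using this
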